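-- pv_equiv track=rewrite | github.com/DonghakPark/TIL | Study_Algorithm/2019 카카오 개발자 겨울 인턴쉽 문제 풀이/kakao_징검다리_sol.py | solution
-- ===== SOURCE A (Python) =====
-- def solution(stones, k):
--     answer = 0
--     while True:
--         if st(stones) == 1:
--             return answer
--
--         answer += 1
--         for i in range(len(stones)):
--             if stones[i] > 0:
--                 stones[i] -= 1
--
-- def st(stones):
--     for i in range(0, len(stones)-2):
--         if (stones[i] <=0 and stones[i+1] <= 0 and stones[i+2] <=0):
--             return 1
-- ===== SOURCE B (Python) =====
-- def solution(stones, k):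
--     # Note: unlike A, B does not mutate `stones`; equivalence is about the return value.
--     return min(max(0, stones[i], stones[i + 1], stones[i + 2]) for i in range(len(stones) - 2))
-- ===== Notes on version B (the rewrite author's own statement) =====
-- stated objective: alternative
-- what changed: Replaced the repeated decrement-all-stones simulation loop with a single pass taking the minimum over size-3 windows of max(0, window maximum).
import Mathlib
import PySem

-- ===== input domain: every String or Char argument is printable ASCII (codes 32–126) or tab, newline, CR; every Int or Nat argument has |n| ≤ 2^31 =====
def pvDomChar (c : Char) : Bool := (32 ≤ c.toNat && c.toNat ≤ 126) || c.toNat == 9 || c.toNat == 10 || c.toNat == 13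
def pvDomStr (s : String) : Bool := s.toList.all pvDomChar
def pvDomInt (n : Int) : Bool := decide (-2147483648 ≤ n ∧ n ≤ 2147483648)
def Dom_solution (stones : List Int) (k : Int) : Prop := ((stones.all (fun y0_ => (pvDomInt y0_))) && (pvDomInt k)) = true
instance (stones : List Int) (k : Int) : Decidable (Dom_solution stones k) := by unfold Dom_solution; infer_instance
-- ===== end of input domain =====

-- B replaces A's decrement-everything simulation by one pass over size-3 windows (min of window maxima);
-- A mutates `stones` in place in Python, B does not: the equivalence proved here is about the return value only.

-- ===== PORT A =====
-- helper `st`: returns 1 if some window of 3 consecutive stones is all ≤ 0, else None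
def stA (stones : List Int) : Option Int :=
  if (List.range (stones.length - 2)).any
      (fun i => decide (stones.getD i 0 ≤ 0 ∧ stones.getD (i+1) 0 ≤ 0 ∧ stones.getD (i+2) 0 ≤ 0))
  then some 1 else none

-- one round of `stones[i] -= 1` for positive stones
def decStone (x : Int) : Int := if x > 0 then x - 1 else x

-- termination measure for A's while-loop
def muA (stones : List Int) : Nat := (stones.map Int.toNat).sum

lemma muA_map_le (l : List Int) : muA (l.map decStone) ≤ muA l := by
  induction l with
  | nil => simp [muA]
  | cons a t ih =>
    simp only [muA, List.map_cons, List.sum_cons] at *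
    have : (decStone a).toNat ≤ a.toNat := by unfold decStone; split <;> omega
    omega

lemma muA_map_lt (l : List Int) (h : ∃ x ∈ l, 0 < x) : muA (l.map decStone) < muA l := by
  induction l with
  | nil => simp at h
  | cons a t ih =>
    simp only [muA, List.map_cons, List.sum_cons] at *
    rcases h with ⟨x, hx, hxpos⟩
    rcases List.mem_cons.mp hx with rfl | hxt
    · have : (decStone x).toNat < x.toNat := by unfold decStone; split <;> omega
      have := muA_map_le t
      simp only [muA] at this
      omega
    · have h1 : (decStone a).toNat ≤ a.toNat := by unfold decStone; split <;> omega
      have h2 := ih ⟨x, hxt, hxpos⟩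
      omega

-- A's `while True` loop; the second guard makes the function total where Python diverges
-- (no 3-window exists and all stones are already ≤ 0, possible only for len < 3; outside Pre_)
def loopA (stones : List Int) (answer : Int) : Int :=
  if stA stones = some 1 then answer
  else if h : stones.all (fun x => decide (x ≤ 0)) then answer
  else loopA (stones.map decStone) (answer + 1)
termination_by muA stones
decreasing_by
  have heq : List.map (fun x : {x // x ∈ stones} => decStone ↑x) stones.attach = stones.map decStone := by
    simp
  rw [heq]
  refine muA_map_lt stones ?_
  simp only [List.all_eq_true, decide_eq_true_eq] at h
  push_neg at h
  obtain ⟨x, hx, hxx⟩ := h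
  exact ⟨x, hx, by omega⟩

def solution (stones : List Int) (k : Int) : Int := loopA stones 0

-- ===== PORT B =====
-- max(0, stones[i], stones[i+1], stones[i+2])
def wval (stones : List Int) (i : Nat) : Int :=
  max 0 (max (stones.getD i 0) (max (stones.getD (i+1) 0) (stones.getD (i+2) 0)))

-- Python's min over a nonempty list (min([]) raises ValueError; outside Pre_)
def minL (l : List Int) : Int :=
  match l with
  | [] => 0
  | h :: t => t.foldl min h

def solution_alt (stones : List Int) (k : Int) : Int :=
  minL ((List.range (stones.length - 2)).map (wval stones))

-- ===== PRECONDITION & SPEC =====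
-- Pre_ excludes lists of fewer than 3 stones: there A's `st` can never return 1, so A loops forever
-- (and B's min over an empty sequence raises ValueError); A never returns a value there.
def Pre_solution (stones : List Int) (k : Int) : Prop := 3 ≤ stones.length
instance (stones : List Int) (k : Int) : Decidable (Pre_solution stones k) := by
  unfold Pre_solution; infer_instance

def pvWitness_solution : List Int × Int := ([2, 4, 5, 3, 2, 1, 4, 2, 5, 1], 3)

def Spec_solution (stones : List Int) (k : Int) (out : Int) : Prop := out = solution_alt stones k
instance (stones : List Int) (k : Int) (out : Int) : Decidable (Spec_solution stones k out) := by
  unfold Spec_solution; infer_instance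

-- ===== CLAIM (what is proved, stated in full; the proofs are below) =====
def Claim_equal_solution : Prop := ∀ (stones : List Int) (k : Int), Dom_solution stones k → Pre_solution stones k → Spec_solution stones k (solution stones k)

-- ===== LEMMAS AND PROOFS =====

lemma foldl_min_le_init (t : List Int) (h : Int) : t.foldl min h ≤ h := by
  induction t generalizing h with
  | nil => simp
  | cons a t ih => exact le_trans (ih (min h a)) (min_le_left _ _)

lemma foldl_min_le_mem (t : List Int) (h x : Int) (hx : x ∈ t) : t.foldl min h ≤ x := by
  induction t generalizing h with
  | nil => simp at hx
  | cons a t ih =>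
    rcases List.mem_cons.mp hx with rfl | hxt
    · exact le_trans (foldl_min_le_init t _) (min_le_right _ _)
    · exact ih _ hxt

lemma foldl_min_mem (t : List Int) (h : Int) : t.foldl min h = h ∨ t.foldl min h ∈ t := by
  induction t generalizing h with
  | nil => simp
  | cons a t ih =>
    simp only [List.foldl_cons]
    rcases ih (min h a) with heq | hmem
    · rcases le_or_gt h a with hle | hgt
      · left; rw [heq]; exact min_eq_left hle
      · right; rw [heq]; simp; left; omega
    · right; exact List.mem_cons_of_mem _ hmem

lemma minL_mem (l : List Int) (hne : l ≠ []) : minL l ∈ l := by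
  cases l with
  | nil => exact absurd rfl hne
  | cons h t =>
    rcases foldl_min_mem t h with heq | hmem
    · simp [minL, heq]
    · exact List.mem_cons_of_mem _ (by simpa [minL] using hmem)

lemma minL_le (l : List Int) (x : Int) (hx : x ∈ l) : minL l ≤ x := by
  cases l with
  | nil => simp at hx
  | cons h t =>
    rcases List.mem_cons.mp hx with rfl | hxt
    · simpa [minL] using foldl_min_le_init t x
    · simpa [minL] using foldl_min_le_mem t h x hxt

lemma foldl_min_map_sub (t : List Int) (h : Int) :
    (t.map (· - 1)).foldl min (h - 1) = t.foldl min h - 1 := by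
  induction t generalizing h with
  | nil => simp
  | cons a t ih =>
    simp only [List.map_cons, List.foldl_cons]
    rw [show min (h - 1) (a - 1) = min h a - 1 by omega]
    exact ih _

lemma minL_map_sub (l : List Int) (hne : l ≠ []) : minL (l.map (· - 1)) = minL l - 1 := by
  cases l with
  | nil => exact absurd rfl hne
  | cons h t => simpa [minL] using foldl_min_map_sub t h

lemma wval_nonneg (stones : List Int) (i : Nat) : 0 ≤ wval stones i := by
  unfold wval; omega

lemma getD_map_dec (l : List Int) (j : Nat) (hj : j < l.length) :
    (l.map decStone).getD j 0 = decStone (l.getD j 0) := by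
  rw [List.getD_eq_getElem l 0 hj, List.getD_eq_getElem _ 0 (by simpa using hj)]
  simp

lemma wval_map_dec (stones : List Int) (i : Nat) (hi : i + 2 < stones.length)
    (h1 : 1 ≤ wval stones i) : wval (stones.map decStone) i = wval stones i - 1 := by
  rw [wval, getD_map_dec _ i (by omega), getD_map_dec _ (i+1) (by omega),
      getD_map_dec _ (i+2) (by omega)]
  unfold wval at h1 ⊢
  unfold decStone
  split_ifs <;> omega

-- characterisation of stA
lemma stA_eq_one_iff (stones : List Int) :
    stA stones = some 1 ↔ ∃ i ∈ List.range (stones.length - 2), wval stones i ≤ 0 := by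
  unfold stA
  split_ifs with h
  · simp only [List.any_eq_true, decide_eq_true_eq] at h
    obtain ⟨i, hi, h0, h1, h2⟩ := h
    exact iff_of_true rfl ⟨i, hi, by unfold wval; omega⟩
  · simp only [List.any_eq_true, decide_eq_true_eq] at h
    push_neg at h
    constructor
    · intro hc; simp at hc
    · rintro ⟨i, hi, hv⟩
      exfalso
      unfold wval at hv
      have := h i hi
      omega

lemma wlist_map_dec (stones : List Int) (hst : stA stones ≠ some 1) :
    (List.range ((stones.map decStone).length - 2)).map (wval (stones.map decStone)) =
    ((List.range (stones.length - 2)).map (wval stones)).map (· - 1) := by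
  rw [List.length_map, List.map_map]
  apply List.map_congr_left
  intro i hi
  have hir : i < stones.length - 2 := List.mem_range.mp hi
  have h1 : 1 ≤ wval stones i := by
    by_contra hlt
    exact hst ((stA_eq_one_iff stones).mpr ⟨i, hi, by omega⟩)
  simpa using wval_map_dec stones i (by omega) h1

-- main invariant for A's loop
lemma loopA_eq (μ : Nat) : ∀ (stones : List Int), muA stones ≤ μ → 3 ≤ stones.length →
    ∀ (a : Int), loopA stones a = a + minL ((List.range (stones.length - 2)).map (wval stones)) := by
  induction μ with
  | zero =>
    intro stones hmu h3 a
    rw [loopA.eq_def]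
    have hall : ∀ x ∈ stones, x ≤ 0 := by
      intro x hx
      have : x.toNat ≤ (stones.map Int.toNat).sum := List.single_le_sum (by simp) _ (by simp; exact ⟨x, hx, rfl⟩)
      simp only [muA] at hmu
      omega
    have hst : stA stones = some 1 := by
      rw [stA_eq_one_iff]
      refine ⟨0, List.mem_range.mpr (by omega), ?_⟩
      have h0 : stones.getD 0 0 ∈ stones := by
        rw [List.getD_eq_getElem _ 0 (by omega)]; exact List.getElem_mem _
      have h1 : stones.getD 1 0 ∈ stones := by
        rw [List.getD_eq_getElem _ 0 (by omega)]; exact List.getElem_mem _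
      have h2 : stones.getD 2 0 ∈ stones := by
        rw [List.getD_eq_getElem _ 0 (by omega)]; exact List.getElem_mem _
      have := hall _ h0; have := hall _ h1; have := hall _ h2
      unfold wval; simp only [Nat.zero_add]; omega
    rw [if_pos hst]
    -- minL of the window list is 0
    set L := (List.range (stones.length - 2)).map (wval stones) with hL
    have h0mem : wval stones 0 ∈ L := List.mem_map_of_mem (List.mem_range.mpr (by omega))
    have hw0 : wval stones 0 ≤ 0 := by
      obtain ⟨i, hi, hv⟩ := (stA_eq_one_iff stones).mp hst
      -- reuse: window 0 shown ≤ 0 above is enough; recompute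
      have h0 : stones.getD 0 0 ∈ stones := by
        rw [List.getD_eq_getElem _ 0 (by omega)]; exact List.getElem_mem _
      have h1 : stones.getD 1 0 ∈ stones := by
        rw [List.getD_eq_getElem _ 0 (by omega)]; exact List.getElem_mem _
      have h2 : stones.getD 2 0 ∈ stones := by
        rw [List.getD_eq_getElem _ 0 (by omega)]; exact List.getElem_mem _
      have := hall _ h0; have := hall _ h1; have := hall _ h2
      unfold wval; simp only [Nat.zero_add]; omega
    have hle := minL_le L _ h0mem
    have hmmem := minL_mem L (by intro h; rw [h] at h0mem; simp at h0mem)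
    have hnn : 0 ≤ minL L := by
      obtain ⟨i, hi, hie⟩ := List.mem_map.mp hmmem
      rw [← hie]; exact wval_nonneg stones i
    have := wval_nonneg stones 0
    omega
  | succ μ ih =>
    intro stones hmu h3 a
    rw [loopA.eq_def]
    set L := (List.range (stones.length - 2)).map (wval stones) with hL
    by_cases hst : stA stones = some 1
    · rw [if_pos hst]
      obtain ⟨i, hi, hv⟩ := (stA_eq_one_iff stones).mp hst
      have hmem : wval stones i ∈ L := List.mem_map_of_mem hi
      have hle := minL_le L _ hmem
      have hmmem := minL_mem L (by intro h; rw [h] at hmem; simp at hmem)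
      have hnn : 0 ≤ minL L := by
        obtain ⟨j, hj, hje⟩ := List.mem_map.mp hmmem
        rw [← hje]; exact wval_nonneg stones j
      have := wval_nonneg stones i
      omega
    · rw [if_neg hst]
      have hnotall : ¬ (stones.all (fun x => decide (x ≤ 0)) = true) := by
        intro hall
        simp only [List.all_eq_true, decide_eq_true_eq] at hall
        apply hst
        rw [stA_eq_one_iff]
        refine ⟨0, List.mem_range.mpr (by omega), ?_⟩
        have h0 : stones.getD 0 0 ∈ stones := by
          rw [List.getD_eq_getElem _ 0 (by omega)]; exact List.getElem_mem _
        have h1 : stones.getD 1 0 ∈ stones := by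
          rw [List.getD_eq_getElem _ 0 (by omega)]; exact List.getElem_mem _
        have h2 : stones.getD 2 0 ∈ stones := by
          rw [List.getD_eq_getElem _ 0 (by omega)]; exact List.getElem_mem _
        have := hall _ h0; have := hall _ h1; have := hall _ h2
        unfold wval; simp only [Nat.zero_add]; omega
      rw [dif_neg hnotall]
      have hpos : ∃ x ∈ stones, 0 < x := by
        simp only [List.all_eq_true, decide_eq_true_eq] at hnotall
        push_neg at hnotall
        obtain ⟨x, hx, hxx⟩ := hnotall
        exact ⟨x, hx, by omega⟩
      have hlt := muA_map_lt stones hpos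
      have hrec := ih (stones.map decStone) (by omega) (by simpa using h3) (a + 1)
      rw [hrec, wlist_map_dec stones hst]
      have hLne : L ≠ [] := by
        intro h
        have : wval stones 0 ∈ L := List.mem_map_of_mem (List.mem_range.mpr (by omega))
        rw [h] at this; simp at this
      rw [minL_map_sub L hLne]
      omega

-- ===== VERDICT (by name: the statement is the Claim_ definition above) =====
theorem solution_spec : Claim_equal_solution := by
  intro stones k _hdom hpre
  unfold Spec_solution solution solution_alt
  have := loopA_eq (muA stones) stones le_rfl hpre 0
  omega
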